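-- pv_equiv track=rewrite | github.com/KiranTejz20005/masika | backend/app.py | _build_structured_report
-- ===== SOURCE A (Python) =====
-- def _build_structured_report(ai_result):
--     """Build a structured report string: Wellness Report Summary, Key observation, Suggested next steps, Important note."""
--     def get(*keys, default=""):
--         for k in keys:
--             v = ai_result.get(k)
--             if v is not None and str(v).strip():
--                 return str(v).strip()
--         return default
--
--     summary = get("reason_summary", default="")
--     key_obs = get("key_observation", "detailed_abnormal_note")
--     next_steps = get("suggested_next_steps", "plan_actions")
--     important = get("important_note", "doctor_visit_trigger", "consult_recommendation")
--
--     parts = []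
--     if summary:
--         parts.append("Wellness Report Summary\n" + summary)
--     if key_obs:
--         parts.append("Key observation:\n" + key_obs)
--     if next_steps:
--         parts.append("Suggested next steps:\n" + next_steps)
--     if important:
--         parts.append("Important note about this analysis:\n" + important)
--     return "\n\n".join(parts) if parts else summary or "No report content available."
-- ===== SOURCE B (Python) =====
-- def _build_structured_report(ai_result):
--     """Single pass over the dict items: each recognised key is routed through a
--     key -> (section, rank) index and the lowest-rank non-empty value per section
--     is kept; the report is then assembled from the four section slots."""
--     KEYMAP = {
--         "reason_summary": (0, 0),
--         "key_observation": (1, 0), "detailed_abnormal_note": (1, 1),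
--         "suggested_next_steps": (2, 0), "plan_actions": (2, 1),
--         "important_note": (3, 0), "doctor_visit_trigger": (3, 1),
--         "consult_recommendation": (3, 2),
--     }
--     HEADERS = ["Wellness Report Summary\n", "Key observation:\n",
--                "Suggested next steps:\n", "Important note about this analysis:\n"]
--     best = [None] * 4
--     for k, v in ai_result.items():
--         slot = KEYMAP.get(k)
--         if slot is None or v is None:
--             continue
--         text = str(v).strip()
--         if not text:
--             continue
--         sec, rank = slot
--         if best[sec] is None or rank < best[sec][0]:
--             best[sec] = (rank, text)
--     parts = [HEADERS[i] + best[i][1] for i in range(4) if best[i] is not None]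
--     return "\n\n".join(parts) if parts else "No report content available."
-- ===== Notes on version B (the rewrite author's own statement) =====
-- stated objective: alternative
-- what changed: Instead of four ordered get(...) lookups per section followed by four if-append blocks, B makes a single pass over the dict items, routing each key through a key->(section,rank) index and keeping the lowest-rank non-empty stripped value per section slot, then assembles the report from the four slots.
import Mathlib
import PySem

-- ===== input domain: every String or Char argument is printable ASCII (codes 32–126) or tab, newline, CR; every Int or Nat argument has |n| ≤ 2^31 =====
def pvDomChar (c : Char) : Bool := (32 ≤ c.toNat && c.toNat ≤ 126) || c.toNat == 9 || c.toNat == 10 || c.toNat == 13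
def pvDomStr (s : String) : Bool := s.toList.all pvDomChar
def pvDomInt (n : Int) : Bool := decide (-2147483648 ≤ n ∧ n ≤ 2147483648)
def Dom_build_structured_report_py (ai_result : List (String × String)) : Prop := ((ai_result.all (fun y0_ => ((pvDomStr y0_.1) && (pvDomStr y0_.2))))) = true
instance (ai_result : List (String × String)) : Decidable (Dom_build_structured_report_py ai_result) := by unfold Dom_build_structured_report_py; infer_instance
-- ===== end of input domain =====

-- One honest line: B replaces A's four ordered get(...) lookups + four if-append blocks
-- with a single pass over the items keeping per-section minimum-rank values (alternative; same cost).

-- ===== PORT A =====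
-- dict.get over the association list: first match (type convention); get(*keys) of A
def pvGetA (d : List (String × String)) (keys : List String) (default : String) : String :=
  match keys with
  | [] => default
  | k :: rest =>
    match d.find? (fun p => p.1 == k) with
    | some p => if PySem.Str.strip p.2 ≠ "" then PySem.Str.strip p.2 else pvGetA d rest default
    | none => pvGetA d rest default

def build_structured_report_py (ai_result : List (String × String)) : String :=
  let summary := pvGetA ai_result ["reason_summary"] ""
  let key_obs := pvGetA ai_result ["key_observation", "detailed_abnormal_note"] ""
  let next_steps := pvGetA ai_result ["suggested_next_steps", "plan_actions"] ""
  let important := pvGetA ai_result ["important_note", "doctor_visit_trigger", "consult_recommendation"] ""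
  let parts : List String := []
  let parts := if summary ≠ "" then parts ++ ["Wellness Report Summary\n" ++ summary] else parts
  let parts := if key_obs ≠ "" then parts ++ ["Key observation:\n" ++ key_obs] else parts
  let parts := if next_steps ≠ "" then parts ++ ["Suggested next steps:\n" ++ next_steps] else parts
  let parts := if important ≠ "" then parts ++ ["Important note about this analysis:\n" ++ important] else parts
  if parts ≠ [] then PySem.Str.join "\n\n" parts
  else if summary ≠ "" then summary else "No report content available."

-- ===== PORT B =====
-- KEYMAP of Source B as an association list; KEYMAP.get(k)
def pvKeyTable : List (String × Nat × Nat) :=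
  [("reason_summary", (0, 0)),
   ("key_observation", (1, 0)), ("detailed_abnormal_note", (1, 1)),
   ("suggested_next_steps", (2, 0)), ("plan_actions", (2, 1)),
   ("important_note", (3, 0)), ("doctor_visit_trigger", (3, 1)),
   ("consult_recommendation", (3, 2))]

def pvKeymap (k : String) : Option (Nat × Nat) :=
  (pvKeyTable.find? (fun p => p.1 == k)).map Prod.snd

def pvHeaders : List String :=
  ["Wellness Report Summary\n", "Key observation:\n",
   "Suggested next steps:\n", "Important note about this analysis:\n"]

-- the loop body of Source B (values are strings here, so the 'v is None' guard never fires)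
def pvStep (best : List (Option (Nat × String))) (kv : String × String) :
    List (Option (Nat × String)) :=
  match pvKeymap kv.1 with
  | none => best
  | some (sec, rank) =>
    let text := PySem.Str.strip kv.2
    if text = "" then best
    else
      match best.getD sec none with
      | none => best.set sec (some (rank, text))
      | some (r0, _) => if rank < r0 then best.set sec (some (rank, text)) else best

def pvScan (d : List (String × String)) : List (Option (Nat × String)) :=
  d.foldl pvStep [none, none, none, none]

def build_structured_report_py_alt (ai_result : List (String × String)) : String :=
  let best := pvScan ai_result
  let parts := (List.range 4).filterMap (fun i =>
    (best.getD i none).map (fun rv => pvHeaders.getD i "" ++ rv.2))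
  if parts.isEmpty then "No report content available." else PySem.Str.join "\n\n" parts

-- ===== PRECONDITION & SPEC =====
-- Pre_ excludes association lists with duplicate keys: they represent no Python dict
-- (the function's argument is a dict), and first-match-vs-single-pass resolution is
-- specified by nothing on such lists.
def Pre_build_structured_report_py (ai_result : List (String × String)) : Prop :=
  (ai_result.map Prod.fst).Nodup
instance (ai_result : List (String × String)) : Decidable (Pre_build_structured_report_py ai_result) := by unfold Pre_build_structured_report_py; infer_instance

def pvWitness_build_structured_report_py : (List (String × String)) :=
  [("reason_summary", "all good"), ("plan_actions", " rest ")]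

def Spec_build_structured_report_py (ai_result : List (String × String)) (out : String) : Prop := out = build_structured_report_py_alt ai_result
instance (ai_result : List (String × String)) (out : String) : Decidable (Spec_build_structured_report_py ai_result out) := by unfold Spec_build_structured_report_py; infer_instance

-- ===== CLAIM (what is proved, stated in full; the proofs are below) =====
def Claim_equal_build_structured_report_py : Prop := ∀ (ai_result : List (String × String)), Dom_build_structured_report_py ai_result → Pre_build_structured_report_py ai_result → Spec_build_structured_report_py ai_result (build_structured_report_py ai_result)

-- ===== LEMMAS AND PROOFS =====

-- first key (with its rank) whose first-match value strips non-empty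
def pvResolveR (d : List (String × String)) (keys : List String) (r : Nat) :
    Option (Nat × String) :=
  match keys with
  | [] => none
  | k :: rest =>
    match d.find? (fun p => p.1 == k) with
    | some p =>
      if PySem.Str.strip p.2 ≠ "" then some (r, PySem.Str.strip p.2)
      else pvResolveR d rest (r + 1)
    | none => pvResolveR d rest (r + 1)

theorem pvGetA_eq_resolveR (d : List (String × String)) (keys : List String) (r : Nat) :
    pvGetA d keys "" = ((pvResolveR d keys r).map Prod.snd).getD "" := by
  induction keys generalizing r with
  | nil => rfl
  | cons k rest ih =>
    simp only [pvGetA, pvResolveR]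
    cases h : d.find? (fun p => p.1 == k) with
    | none => exact ih (r + 1)
    | some p =>
      by_cases hs : PySem.Str.strip p.2 ≠ "" <;> simp [hs, ih (r + 1)]

theorem pvResolveR_snd_ne (d : List (String × String)) (keys : List String) (r : Nat)
    (rv : Nat × String) (h : pvResolveR d keys r = some rv) : rv.2 ≠ "" := by
  induction keys generalizing r with
  | nil => simp [pvResolveR] at h
  | cons k rest ih =>
    simp only [pvResolveR] at h
    cases hf : d.find? (fun p => p.1 == k) with
    | none => rw [hf] at h; exact ih (r + 1) h
    | some p =>
      rw [hf] at h
      by_cases hs : PySem.Str.strip p.2 ≠ ""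
      · simp [hs] at h; subst h; exact hs
      · simp [hs] at h; exact ih (r + 1) h

theorem pvResolveR_rank_ge (d : List (String × String)) (keys : List String) (r : Nat)
    (rv : Nat × String) (h : pvResolveR d keys r = some rv) : r ≤ rv.1 := by
  induction keys generalizing r with
  | nil => simp [pvResolveR] at h
  | cons k rest ih =>
    simp only [pvResolveR] at h
    cases hf : d.find? (fun p => p.1 == k) with
    | none => rw [hf] at h; exact Nat.le_of_succ_le (ih (r + 1) h)
    | some p =>
      rw [hf] at h
      by_cases hs : PySem.Str.strip p.2 ≠ ""
      · simp [hs] at h; subst h; exact le_refl r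
      · simp [hs] at h; exact Nat.le_of_succ_le (ih (r + 1) h)

theorem find?_append_ne (d : List (String × String)) (x : String × String) (k : String)
    (h : x.1 ≠ k) :
    (d ++ [x]).find? (fun p => p.1 == k) = d.find? (fun p => p.1 == k) := by
  rw [List.find?_append]
  have hb : (x.1 == k) = false := by simp [h]
  cases hf : d.find? (fun p => p.1 == k) <;> simp [List.find?, hb]

theorem find?_eq_none_of_not_mem (d : List (String × String)) (k : String)
    (h : k ∉ d.map Prod.fst) : d.find? (fun p => p.1 == k) = none := by
  rw [List.find?_eq_none]
  intro p hp
  simp only [beq_iff_eq]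
  intro he
  exact h (List.mem_map.mpr ⟨p, hp, he⟩)

theorem pvResolveR_append_notmem (d : List (String × String)) (x : String × String)
    (keys : List String) (r : Nat) (h : x.1 ∉ keys) :
    pvResolveR (d ++ [x]) keys r = pvResolveR d keys r := by
  induction keys generalizing r with
  | nil => rfl
  | cons k rest ih =>
    simp only [pvResolveR]
    rw [find?_append_ne d x k (by simp at h; exact h.1)]
    cases d.find? (fun p => p.1 == k) with
    | none => exact ih (r + 1) (by simp at h; exact h.2)
    | some p =>
      by_cases hs : PySem.Str.strip p.2 ≠ "" <;>
        simp [hs, ih (r + 1) (by simp at h; exact h.2)]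

-- appending x whose key sits at position j of this section's key list
theorem pvResolveR_append_self (d : List (String × String)) (x : String × String)
    (keys : List String) (r j : Nat)
    (hnd : d.find? (fun p => p.1 == x.1) = none)
    (hj : keys[j]? = some x.1)
    (hnb : x.1 ∉ keys.take j) (hna : x.1 ∉ keys.drop (j + 1)) :
    pvResolveR (d ++ [x]) keys r =
      match pvResolveR d keys r with
      | none =>
        if PySem.Str.strip x.2 = "" then none else some (r + j, PySem.Str.strip x.2)
      | some (r0, v) =>
        if r + j < r0 ∧ PySem.Str.strip x.2 ≠ "" then some (r + j, PySem.Str.strip x.2)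
        else some (r0, v) := by
  induction keys generalizing r j with
  | nil => simp at hj
  | cons k rest ih =>
    cases j with
    | zero =>
      have hk : k = x.1 := by simpa using hj
      have hfind : (d ++ [x]).find? (fun p => p.1 == k) = some x := by
        rw [hk, List.find?_append, hnd]; simp
      have hfd : d.find? (fun p => p.1 == k) = none := by rw [hk]; exact hnd
      simp only [pvResolveR, hfind, hfd]
      have hrest : pvResolveR (d ++ [x]) rest (r + 1) = pvResolveR d rest (r + 1) :=
        pvResolveR_append_notmem d x rest (r + 1) (by simpa using hna)
      by_cases hs : PySem.Str.strip x.2 = ""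
      · simp only [hs, ne_eq, not_true_eq_false, if_false, hrest]
        cases hr : pvResolveR d rest (r + 1) with
        | none => simp [hs]
        | some rv => cases rv with
          | mk r0 v => simp [hs]
      · simp only [ne_eq, hs, not_false_eq_true, if_true]
        cases hr : pvResolveR d rest (r + 1) with
        | none => simp [hs]
        | some rv =>
          cases rv with
          | mk r0 v =>
            have hge : r + 1 ≤ r0 := pvResolveR_rank_ge d rest (r + 1) (r0, v) hr
            have hlt : r + 0 < r0 := by omega
            simp only [hrest, hr, ne_eq, hs, not_false_eq_true, and_true, hlt, if_pos]
            simp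
    | succ j' =>
      have hk : x.1 ≠ k := by simp at hnb; exact hnb.1
      have hfk := find?_append_ne d x k hk
      simp only [pvResolveR, hfk]
      cases hf : d.find? (fun p => p.1 == k) with
      | some p =>
        by_cases hs : PySem.Str.strip p.2 ≠ ""
        · simp [hs]
        · simp only [hs, if_false]
          have := ih (r + 1) j' (by simpa using hj) (by simp at hnb; exact hnb.2)
            (by simpa using hna)
          rw [this]
          have harith : r + 1 + j' = r + (j' + 1) := by omega
          rw [harith]
      | none =>
        have := ih (r + 1) j' (by simpa using hj) (by simp at hnb; exact hnb.2)
          (by simpa using hna)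
        rw [this]
        have harith : r + 1 + j' = r + (j' + 1) := by omega
        rw [harith]


-- per-section resolved slots (helper for the proofs only)
def pvSlots (d : List (String × String)) : List (Option (Nat × String)) :=
  [pvResolveR d ["reason_summary"] 0,
   pvResolveR d ["key_observation", "detailed_abnormal_note"] 0,
   pvResolveR d ["suggested_next_steps", "plan_actions"] 0,
   pvResolveR d ["important_note", "doctor_visit_trigger", "consult_recommendation"] 0]

-- the fold invariant: after scanning a duplicate-free list, the four slots hold
-- exactly the per-section resolved (rank, value) pairs
theorem pvScan_spec (d : List (String × String)) :
    (d.map Prod.fst).Nodup → pvScan d = pvSlots d := by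
  induction d using List.reverseRecOn with
  | nil => intro _; rfl
  | append_singleton d x ih =>
    intro h
    rw [List.map_append, List.nodup_append] at h
    have h1 : (d.map Prod.fst).Nodup := h.1
    have h2 : x.1 ∉ d.map Prod.fst := by
      intro hm
      exact h.2.2 x.1 hm x.1 (by simp) rfl
    have hnd : d.find? (fun p => p.1 == x.1) = none := find?_eq_none_of_not_mem d x.1 h2
    have hstep : pvScan (d ++ [x]) = pvStep (pvScan d) x := by
      simp [pvScan, List.foldl_append]
    rw [hstep, ih h1]
    by_cases e1 : x.1 = "reason_summary"
    · have hkm : pvKeymap x.1 = some (0, 0) := by rw [e1]; rfl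
      have hself := pvResolveR_append_self d x ["reason_summary"] 0 0 hnd
        (by rw [e1]; rfl) (by rw [e1]; decide) (by rw [e1]; decide)
      simp only [pvSlots]
      rw [pvResolveR_append_notmem d x ["key_observation", "detailed_abnormal_note"] 0 (by rw [e1]; decide),
        pvResolveR_append_notmem d x ["suggested_next_steps", "plan_actions"] 0 (by rw [e1]; decide),
        pvResolveR_append_notmem d x ["important_note", "doctor_visit_trigger", "consult_recommendation"] 0 (by rw [e1]; decide), hself]
      simp only [pvStep, hkm]
      by_cases hs : PySem.Str.strip x.2 = ""
      · cases hr : pvResolveR d ["reason_summary"] 0 with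
        | none => simp [hs]
        | some rv => cases rv with
          | mk r0 v => simp [hs]
      · cases hr : pvResolveR d ["reason_summary"] 0 with
        | none => simp [hs]
        | some rv =>
          cases rv with
          | mk r0 v =>
            by_cases hlt : 0 < r0 <;> simp [hs, hlt]
    by_cases e2 : x.1 = "key_observation"
    · have hkm : pvKeymap x.1 = some (1, 0) := by rw [e2]; rfl
      have hself := pvResolveR_append_self d x ["key_observation", "detailed_abnormal_note"] 0 0 hnd
        (by rw [e2]; rfl) (by rw [e2]; decide) (by rw [e2]; decide)
      simp only [pvSlots]
      rw [pvResolveR_append_notmem d x ["reason_summary"] 0 (by rw [e2]; decide),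
        pvResolveR_append_notmem d x ["suggested_next_steps", "plan_actions"] 0 (by rw [e2]; decide),
        pvResolveR_append_notmem d x ["important_note", "doctor_visit_trigger", "consult_recommendation"] 0 (by rw [e2]; decide), hself]
      simp only [pvStep, hkm]
      by_cases hs : PySem.Str.strip x.2 = ""
      · cases hr : pvResolveR d ["key_observation", "detailed_abnormal_note"] 0 with
        | none => simp [hs]
        | some rv => cases rv with
          | mk r0 v => simp [hs]
      · cases hr : pvResolveR d ["key_observation", "detailed_abnormal_note"] 0 with
        | none => simp [hs]
        | some rv =>
          cases rv with
          | mk r0 v =>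
            by_cases hlt : 0 < r0 <;> simp [hs, hlt]
    by_cases e3 : x.1 = "detailed_abnormal_note"
    · have hkm : pvKeymap x.1 = some (1, 1) := by rw [e3]; rfl
      have hself := pvResolveR_append_self d x ["key_observation", "detailed_abnormal_note"] 0 1 hnd
        (by rw [e3]; rfl) (by rw [e3]; decide) (by rw [e3]; decide)
      simp only [pvSlots]
      rw [pvResolveR_append_notmem d x ["reason_summary"] 0 (by rw [e3]; decide),
        pvResolveR_append_notmem d x ["suggested_next_steps", "plan_actions"] 0 (by rw [e3]; decide),
        pvResolveR_append_notmem d x ["important_note", "doctor_visit_trigger", "consult_recommendation"] 0 (by rw [e3]; decide), hself]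
      simp only [pvStep, hkm]
      by_cases hs : PySem.Str.strip x.2 = ""
      · cases hr : pvResolveR d ["key_observation", "detailed_abnormal_note"] 0 with
        | none => simp [hs]
        | some rv => cases rv with
          | mk r0 v => simp [hs]
      · cases hr : pvResolveR d ["key_observation", "detailed_abnormal_note"] 0 with
        | none => simp [hs]
        | some rv =>
          cases rv with
          | mk r0 v =>
            by_cases hlt : 1 < r0 <;> simp [hs, hlt]
    by_cases e4 : x.1 = "suggested_next_steps"
    · have hkm : pvKeymap x.1 = some (2, 0) := by rw [e4]; rfl
      have hself := pvResolveR_append_self d x ["suggested_next_steps", "plan_actions"] 0 0 hnd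
        (by rw [e4]; rfl) (by rw [e4]; decide) (by rw [e4]; decide)
      simp only [pvSlots]
      rw [pvResolveR_append_notmem d x ["reason_summary"] 0 (by rw [e4]; decide),
        pvResolveR_append_notmem d x ["key_observation", "detailed_abnormal_note"] 0 (by rw [e4]; decide),
        pvResolveR_append_notmem d x ["important_note", "doctor_visit_trigger", "consult_recommendation"] 0 (by rw [e4]; decide), hself]
      simp only [pvStep, hkm]
      by_cases hs : PySem.Str.strip x.2 = ""
      · cases hr : pvResolveR d ["suggested_next_steps", "plan_actions"] 0 with
        | none => simp [hs]
        | some rv => cases rv with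
          | mk r0 v => simp [hs]
      · cases hr : pvResolveR d ["suggested_next_steps", "plan_actions"] 0 with
        | none => simp [hs]
        | some rv =>
          cases rv with
          | mk r0 v =>
            by_cases hlt : 0 < r0 <;> simp [hs, hlt]
    by_cases e5 : x.1 = "plan_actions"
    · have hkm : pvKeymap x.1 = some (2, 1) := by rw [e5]; rfl
      have hself := pvResolveR_append_self d x ["suggested_next_steps", "plan_actions"] 0 1 hnd
        (by rw [e5]; rfl) (by rw [e5]; decide) (by rw [e5]; decide)
      simp only [pvSlots]
      rw [pvResolveR_append_notmem d x ["reason_summary"] 0 (by rw [e5]; decide),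
        pvResolveR_append_notmem d x ["key_observation", "detailed_abnormal_note"] 0 (by rw [e5]; decide),
        pvResolveR_append_notmem d x ["important_note", "doctor_visit_trigger", "consult_recommendation"] 0 (by rw [e5]; decide), hself]
      simp only [pvStep, hkm]
      by_cases hs : PySem.Str.strip x.2 = ""
      · cases hr : pvResolveR d ["suggested_next_steps", "plan_actions"] 0 with
        | none => simp [hs]
        | some rv => cases rv with
          | mk r0 v => simp [hs]
      · cases hr : pvResolveR d ["suggested_next_steps", "plan_actions"] 0 with
        | none => simp [hs]
        | some rv =>
          cases rv with
          | mk r0 v =>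
            by_cases hlt : 1 < r0 <;> simp [hs, hlt]
    by_cases e6 : x.1 = "important_note"
    · have hkm : pvKeymap x.1 = some (3, 0) := by rw [e6]; rfl
      have hself := pvResolveR_append_self d x ["important_note", "doctor_visit_trigger", "consult_recommendation"] 0 0 hnd
        (by rw [e6]; rfl) (by rw [e6]; decide) (by rw [e6]; decide)
      simp only [pvSlots]
      rw [pvResolveR_append_notmem d x ["reason_summary"] 0 (by rw [e6]; decide),
        pvResolveR_append_notmem d x ["key_observation", "detailed_abnormal_note"] 0 (by rw [e6]; decide),
        pvResolveR_append_notmem d x ["suggested_next_steps", "plan_actions"] 0 (by rw [e6]; decide), hself]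
      simp only [pvStep, hkm]
      by_cases hs : PySem.Str.strip x.2 = ""
      · cases hr : pvResolveR d ["important_note", "doctor_visit_trigger", "consult_recommendation"] 0 with
        | none => simp [hs]
        | some rv => cases rv with
          | mk r0 v => simp [hs]
      · cases hr : pvResolveR d ["important_note", "doctor_visit_trigger", "consult_recommendation"] 0 with
        | none => simp [hs]
        | some rv =>
          cases rv with
          | mk r0 v =>
            by_cases hlt : 0 < r0 <;> simp [hs, hlt]
    by_cases e7 : x.1 = "doctor_visit_trigger"
    · have hkm : pvKeymap x.1 = some (3, 1) := by rw [e7]; rfl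
      have hself := pvResolveR_append_self d x ["important_note", "doctor_visit_trigger", "consult_recommendation"] 0 1 hnd
        (by rw [e7]; rfl) (by rw [e7]; decide) (by rw [e7]; decide)
      simp only [pvSlots]
      rw [pvResolveR_append_notmem d x ["reason_summary"] 0 (by rw [e7]; decide),
        pvResolveR_append_notmem d x ["key_observation", "detailed_abnormal_note"] 0 (by rw [e7]; decide),
        pvResolveR_append_notmem d x ["suggested_next_steps", "plan_actions"] 0 (by rw [e7]; decide), hself]
      simp only [pvStep, hkm]
      by_cases hs : PySem.Str.strip x.2 = ""
      · cases hr : pvResolveR d ["important_note", "doctor_visit_trigger", "consult_recommendation"] 0 with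
        | none => simp [hs]
        | some rv => cases rv with
          | mk r0 v => simp [hs]
      · cases hr : pvResolveR d ["important_note", "doctor_visit_trigger", "consult_recommendation"] 0 with
        | none => simp [hs]
        | some rv =>
          cases rv with
          | mk r0 v =>
            by_cases hlt : 1 < r0 <;> simp [hs, hlt]
    by_cases e8 : x.1 = "consult_recommendation"
    · have hkm : pvKeymap x.1 = some (3, 2) := by rw [e8]; rfl
      have hself := pvResolveR_append_self d x ["important_note", "doctor_visit_trigger", "consult_recommendation"] 0 2 hnd
        (by rw [e8]; rfl) (by rw [e8]; decide) (by rw [e8]; decide)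
      simp only [pvSlots]
      rw [pvResolveR_append_notmem d x ["reason_summary"] 0 (by rw [e8]; decide),
        pvResolveR_append_notmem d x ["key_observation", "detailed_abnormal_note"] 0 (by rw [e8]; decide),
        pvResolveR_append_notmem d x ["suggested_next_steps", "plan_actions"] 0 (by rw [e8]; decide), hself]
      simp only [pvStep, hkm]
      by_cases hs : PySem.Str.strip x.2 = ""
      · cases hr : pvResolveR d ["important_note", "doctor_visit_trigger", "consult_recommendation"] 0 with
        | none => simp [hs]
        | some rv => cases rv with
          | mk r0 v => simp [hs]
      · cases hr : pvResolveR d ["important_note", "doctor_visit_trigger", "consult_recommendation"] 0 with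
        | none => simp [hs]
        | some rv =>
          cases rv with
          | mk r0 v =>
            by_cases hlt : 2 < r0 <;> simp [hs, hlt]
    have hkm : pvKeymap x.1 = none := by
      have f1 : ("reason_summary" == x.1) = false := by
        simp only [beq_eq_false_iff_ne]; exact Ne.symm e1
      have f2 : ("key_observation" == x.1) = false := by
        simp only [beq_eq_false_iff_ne]; exact Ne.symm e2
      have f3 : ("detailed_abnormal_note" == x.1) = false := by
        simp only [beq_eq_false_iff_ne]; exact Ne.symm e3
      have f4 : ("suggested_next_steps" == x.1) = false := by
        simp only [beq_eq_false_iff_ne]; exact Ne.symm e4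
      have f5 : ("plan_actions" == x.1) = false := by
        simp only [beq_eq_false_iff_ne]; exact Ne.symm e5
      have f6 : ("important_note" == x.1) = false := by
        simp only [beq_eq_false_iff_ne]; exact Ne.symm e6
      have f7 : ("doctor_visit_trigger" == x.1) = false := by
        simp only [beq_eq_false_iff_ne]; exact Ne.symm e7
      have f8 : ("consult_recommendation" == x.1) = false := by
        simp only [beq_eq_false_iff_ne]; exact Ne.symm e8
      simp [pvKeymap, pvKeyTable, List.find?, f1, f2, f3, f4, f5, f6, f7, f8]
    simp only [pvStep, hkm, pvSlots]
    rw [pvResolveR_append_notmem d x ["reason_summary"] 0 (by simp [e1, e2, e3, e4, e5, e6, e7, e8]),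
      pvResolveR_append_notmem d x ["key_observation", "detailed_abnormal_note"] 0 (by simp [e1, e2, e3, e4, e5, e6, e7, e8]),
      pvResolveR_append_notmem d x ["suggested_next_steps", "plan_actions"] 0 (by simp [e1, e2, e3, e4, e5, e6, e7, e8]),
      pvResolveR_append_notmem d x ["important_note", "doctor_visit_trigger", "consult_recommendation"] 0 (by simp [e1, e2, e3, e4, e5, e6, e7, e8])]


-- ===== VERDICT (by name: the statement is the Claim_ definition above) =====
theorem build_structured_report_py_spec : Claim_equal_build_structured_report_py := by
  intro d _ hpre
  unfold Spec_build_structured_report_py build_structured_report_py build_structured_report_py_alt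
  rw [pvScan_spec d hpre,
    pvGetA_eq_resolveR d ["reason_summary"] 0,
    pvGetA_eq_resolveR d ["key_observation", "detailed_abnormal_note"] 0,
    pvGetA_eq_resolveR d ["suggested_next_steps", "plan_actions"] 0,
    pvGetA_eq_resolveR d ["important_note", "doctor_visit_trigger", "consult_recommendation"] 0]
  simp only [pvSlots]
  cases h1 : pvResolveR d ["reason_summary"] 0 with
  | none =>
    cases h2 : pvResolveR d ["key_observation", "detailed_abnormal_note"] 0 with
    | none =>
      cases h3 : pvResolveR d ["suggested_next_steps", "plan_actions"] 0 with
      | none =>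
        cases h4 : pvResolveR d ["important_note", "doctor_visit_trigger", "consult_recommendation"] 0 with
        | none =>
          simp [List.range_succ, pvHeaders]
        | some rv4 =>
          have n4 := pvResolveR_snd_ne d ["important_note", "doctor_visit_trigger", "consult_recommendation"] 0 rv4 h4
          simp [n4, List.range_succ, pvHeaders]
      | some rv3 =>
        have n3 := pvResolveR_snd_ne d ["suggested_next_steps", "plan_actions"] 0 rv3 h3
        cases h4 : pvResolveR d ["important_note", "doctor_visit_trigger", "consult_recommendation"] 0 with
        | none =>
          simp [n3, List.range_succ, pvHeaders]
        | some rv4 =>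
          have n4 := pvResolveR_snd_ne d ["important_note", "doctor_visit_trigger", "consult_recommendation"] 0 rv4 h4
          simp [n3, n4, List.range_succ, pvHeaders]
    | some rv2 =>
      have n2 := pvResolveR_snd_ne d ["key_observation", "detailed_abnormal_note"] 0 rv2 h2
      cases h3 : pvResolveR d ["suggested_next_steps", "plan_actions"] 0 with
      | none =>
        cases h4 : pvResolveR d ["important_note", "doctor_visit_trigger", "consult_recommendation"] 0 with
        | none =>
          simp [n2, List.range_succ, pvHeaders]
        | some rv4 =>
          have n4 := pvResolveR_snd_ne d ["important_note", "doctor_visit_trigger", "consult_recommendation"] 0 rv4 h4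
          simp [n2, n4, List.range_succ, pvHeaders]
      | some rv3 =>
        have n3 := pvResolveR_snd_ne d ["suggested_next_steps", "plan_actions"] 0 rv3 h3
        cases h4 : pvResolveR d ["important_note", "doctor_visit_trigger", "consult_recommendation"] 0 with
        | none =>
          simp [n2, n3, List.range_succ, pvHeaders]
        | some rv4 =>
          have n4 := pvResolveR_snd_ne d ["important_note", "doctor_visit_trigger", "consult_recommendation"] 0 rv4 h4
          simp [n2, n3, n4, List.range_succ, pvHeaders]
  | some rv1 =>
    have n1 := pvResolveR_snd_ne d ["reason_summary"] 0 rv1 h1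
    cases h2 : pvResolveR d ["key_observation", "detailed_abnormal_note"] 0 with
    | none =>
      cases h3 : pvResolveR d ["suggested_next_steps", "plan_actions"] 0 with
      | none =>
        cases h4 : pvResolveR d ["important_note", "doctor_visit_trigger", "consult_recommendation"] 0 with
        | none =>
          simp [n1, List.range_succ, pvHeaders]
        | some rv4 =>
          have n4 := pvResolveR_snd_ne d ["important_note", "doctor_visit_trigger", "consult_recommendation"] 0 rv4 h4
          simp [n1, n4, List.range_succ, pvHeaders]
      | some rv3 =>
        have n3 := pvResolveR_snd_ne d ["suggested_next_steps", "plan_actions"] 0 rv3 h3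
        cases h4 : pvResolveR d ["important_note", "doctor_visit_trigger", "consult_recommendation"] 0 with
        | none =>
          simp [n1, n3, List.range_succ, pvHeaders]
        | some rv4 =>
          have n4 := pvResolveR_snd_ne d ["important_note", "doctor_visit_trigger", "consult_recommendation"] 0 rv4 h4
          simp [n1, n3, n4, List.range_succ, pvHeaders]
    | some rv2 =>
      have n2 := pvResolveR_snd_ne d ["key_observation", "detailed_abnormal_note"] 0 rv2 h2
      cases h3 : pvResolveR d ["suggested_next_steps", "plan_actions"] 0 with
      | none =>
        cases h4 : pvResolveR d ["important_note", "doctor_visit_trigger", "consult_recommendation"] 0 with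
        | none =>
          simp [n1, n2, List.range_succ, pvHeaders]
        | some rv4 =>
          have n4 := pvResolveR_snd_ne d ["important_note", "doctor_visit_trigger", "consult_recommendation"] 0 rv4 h4
          simp [n1, n2, n4, List.range_succ, pvHeaders]
      | some rv3 =>
        have n3 := pvResolveR_snd_ne d ["suggested_next_steps", "plan_actions"] 0 rv3 h3
        cases h4 : pvResolveR d ["important_note", "doctor_visit_trigger", "consult_recommendation"] 0 with
        | none =>
          simp [n1, n2, n3, List.range_succ, pvHeaders]
        | some rv4 =>
          have n4 := pvResolveR_snd_ne d ["important_note", "doctor_visit_trigger", "consult_recommendation"] 0 rv4 h4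
          simp [n1, n2, n3, n4, List.range_succ, pvHeaders]
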